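-- pv_equiv track=rewrite | github.com/gijswijnholds/compdisteval | code/preprocess/noun_frequencies.py | lemmatiseNounFrequencies
-- ===== SOURCE A (Python) =====
-- def lemmatiseNounFrequencies(oldFreqs):
--     newFreqs = {}
--     for n in oldFreqs:
--         if n.islower():
--             if n in newFreqs:
--                 newFreqs[n] += oldFreqs[n]
--             else:
--                 newFreqs[n] = oldFreqs[n]
--         if not n.islower():
--             if n.lower() in newFreqs:
--                 newFreqs[n.lower()] += oldFreqs[n]
--             else:
--                 newFreqs[n.lower()] = oldFreqs[n]
--     return newFreqs
-- ===== SOURCE B (Python) =====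
-- def lemmatiseNounFrequencies(oldFreqs):
--     # Two-pass group-by: collect the lowercased keys in first-occurrence order,
--     # then compute each group's total with a per-key scan.
--     keys = dict.fromkeys(n.lower() for n in oldFreqs)
--     return {k: sum(v for n, v in oldFreqs.items() if n.lower() == k) for k in keys}
-- ===== Notes on version B (the rewrite author's own statement) =====
-- stated objective: alternative
-- what changed: Replaces A's single-pass dict accumulation with islower/non-islower branches by a two-pass group-by: dedup the lowercased keys in first-occurrence order, then a per-key scan summing the matching values.
import Mathlib
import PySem

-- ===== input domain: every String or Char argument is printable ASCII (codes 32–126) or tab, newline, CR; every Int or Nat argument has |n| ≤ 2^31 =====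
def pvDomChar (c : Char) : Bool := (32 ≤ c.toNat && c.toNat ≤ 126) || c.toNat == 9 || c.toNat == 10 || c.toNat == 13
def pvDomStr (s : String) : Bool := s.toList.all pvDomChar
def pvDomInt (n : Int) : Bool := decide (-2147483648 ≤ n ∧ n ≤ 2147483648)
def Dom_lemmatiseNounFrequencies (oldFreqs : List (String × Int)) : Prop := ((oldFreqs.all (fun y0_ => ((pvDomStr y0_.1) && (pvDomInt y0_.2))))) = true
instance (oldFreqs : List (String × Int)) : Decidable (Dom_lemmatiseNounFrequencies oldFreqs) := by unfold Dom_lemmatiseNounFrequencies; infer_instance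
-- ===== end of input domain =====

-- B replaces A's single-pass dict accumulation (with islower/non-islower branches) by a
-- two-pass group-by over the deduplicated lowercased keys; an alternative decomposition, not faster.
-- The input models a Python dict, so it is an association list iterated in insertion order.

-- ===== PORT A =====
-- hand port of Python str.islower() (no PySem string-level primitive): at least one
-- lowercase letter and no uppercase letter; exact on the ASCII domain, where the
-- cased characters are exactly the letters.
def pyIslower (s : String) : Bool :=
  s.toList.any PySem.Chars.islower && s.toList.all (fun c => !PySem.Chars.isupper c)

def lemmatiseNounFrequencies (oldFreqs : List (String × Int)) : List (String × Int) :=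
  (oldFreqs.foldl (fun (newFreqs : PySem.Dict String Int) p =>
    let newFreqs :=
      if pyIslower p.1 then
        if newFreqs.contains p.1 then newFreqs.modify p.1 0 (· + p.2)
        else newFreqs.insert p.1 p.2
      else newFreqs
    if !pyIslower p.1 then
      if newFreqs.contains (PySem.Str.lower p.1) then
        newFreqs.modify (PySem.Str.lower p.1) 0 (· + p.2)
      else newFreqs.insert (PySem.Str.lower p.1) p.2
    else newFreqs) PySem.Dict.empty).items

-- ===== PORT B =====
def lemmatiseNounFrequencies_alt (oldFreqs : List (String × Int)) : List (String × Int) :=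
  (PySem.List.dedup (oldFreqs.map (fun p => PySem.Str.lower p.1))).map
    (fun k => (k, ((oldFreqs.filter (fun p => PySem.Str.lower p.1 == k)).map Prod.snd).sum))

-- ===== PRECONDITION & SPEC =====
def Spec_lemmatiseNounFrequencies (oldFreqs : List (String × Int)) (out : List (String × Int)) : Prop := out = lemmatiseNounFrequencies_alt oldFreqs
instance (oldFreqs : List (String × Int)) (out : List (String × Int)) : Decidable (Spec_lemmatiseNounFrequencies oldFreqs out) := by unfold Spec_lemmatiseNounFrequencies; infer_instance

-- ===== CLAIM (what is proved, stated in full; the proofs are below) =====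
def Claim_equal_lemmatiseNounFrequencies : Prop := ∀ (oldFreqs : List (String × Int)), Dom_lemmatiseNounFrequencies oldFreqs → Spec_lemmatiseNounFrequencies oldFreqs (lemmatiseNounFrequencies oldFreqs)

-- ===== LEMMAS AND PROOFS =====

-- a string with no uppercase letters is fixed by lower
theorem lower_eq_self_of_no_upper (s : String)
    (h : s.toList.all (fun c => !PySem.Chars.isupper c) = true) :
    PySem.Str.lower s = s := by
  apply String.toList_inj.mp
  rw [PySem.Str.toList_lower]
  simp only [List.all_eq_true] at h
  unfold PySem.Chars.lower
  have : s.toList.map PySem.Chars.lowerChar = s.toList.map id := by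
    apply List.map_congr_left
    intro c hc
    have hu := h c hc
    simp only [Bool.not_eq_true'] at hu
    simp [PySem.Chars.lowerChar, hu]
  rw [this, List.map_id]

-- A's loop body is, on every input, the single keyed update "insert (lower n) (old + v)"
theorem stepA_eq (d : PySem.Dict String Int) (p : String × Int) :
    (let d' :=
      if pyIslower p.1 then
        if d.contains p.1 then d.modify p.1 0 (· + p.2)
        else d.insert p.1 p.2
      else d
    if !pyIslower p.1 then
      if d'.contains (PySem.Str.lower p.1) then
        d'.modify (PySem.Str.lower p.1) 0 (· + p.2)
      else d'.insert (PySem.Str.lower p.1) p.2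
    else d') = d.insert (PySem.Str.lower p.1) (d.getD (PySem.Str.lower p.1) 0 + p.2) := by
  by_cases hl : pyIslower p.1 = true
  · have hfix : PySem.Str.lower p.1 = p.1 :=
      lower_eq_self_of_no_upper _ (by
        have := hl; unfold pyIslower at this
        exact (Bool.and_eq_true _ _ |>.mp this).2)
    simp only [hl, if_true, Bool.not_true, Bool.false_eq_true, if_false]
    rw [hfix]
    by_cases hc : d.contains p.1 = true
    · simp [hc, PySem.Dict.modify, Int.add_comm]
    · simp only [Bool.not_eq_true] at hc
      simp [hc, PySem.Dict.getD_of_not_contains _ _ hc]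
  · simp only [Bool.not_eq_true] at hl
    simp only [hl, Bool.not_false, if_true]
    by_cases hc : d.contains (PySem.Str.lower p.1) = true
    · simp [hc, PySem.Dict.modify, Int.add_comm]
    · simp only [Bool.not_eq_true] at hc
      simp [hc, PySem.Dict.getD_of_not_contains _ _ hc]

-- the keyed accumulation loop's final value at any key k
theorem getD_foldl_keyed_add (l : List (String × Int)) (d : PySem.Dict String Int) (k : String) :
    (l.foldl (fun d p => d.insert (PySem.Str.lower p.1) (d.getD (PySem.Str.lower p.1) 0 + p.2)) d).getD k 0
      = d.getD k 0 + ((l.filter (fun p => PySem.Str.lower p.1 == k)).map Prod.snd).sum := by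
  induction l generalizing d with
  | nil => simp
  | cons p t ih =>
    simp only [List.foldl_cons, ih, List.filter_cons]
    by_cases hk : PySem.Str.lower p.1 = k
    · simp [hk]
      ring
    · rw [PySem.Dict.getD_insert]
      simp [hk, Ne.symm hk]

-- ===== VERDICT (by name: the statement is the Claim_ definition above) =====
theorem lemmatiseNounFrequencies_spec : Claim_equal_lemmatiseNounFrequencies := by
  intro oldFreqs _
  unfold Spec_lemmatiseNounFrequencies lemmatiseNounFrequencies lemmatiseNounFrequencies_alt
  rw [PySem.List.foldl_congr_mem _ _
      (fun d p => d.insert (PySem.Str.lower p.1) (d.getD (PySem.Str.lower p.1) 0 + p.2)) _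
      (fun d p _ => stepA_eq d p)]
  have hnd : (oldFreqs.foldl (fun (d : PySem.Dict String Int) p =>
      d.insert (PySem.Str.lower p.1) (d.getD (PySem.Str.lower p.1) 0 + p.2)) PySem.Dict.empty).keys.Nodup :=
    PySem.Dict.nodup_keys_foldl_insert_key oldFreqs (fun p => PySem.Str.lower p.1)
      (fun d p => d.getD (PySem.Str.lower p.1) 0 + p.2) PySem.Dict.empty (by simp)
  rw [PySem.Dict.items_eq_map_keys _ hnd 0,
    PySem.Dict.keys_foldl_insert_key oldFreqs (fun p => PySem.Str.lower p.1)
      (fun d p => d.getD (PySem.Str.lower p.1) 0 + p.2) PySem.Dict.empty]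
  rw [PySem.List.dedup_eq_ofList]
  have hupd : PySem.Set.update (PySem.Dict.empty : PySem.Dict String Int).keys
      (oldFreqs.map (fun p => PySem.Str.lower p.1))
      = PySem.Set.ofList (oldFreqs.map (fun p => PySem.Str.lower p.1)) := rfl
  rw [hupd]
  apply List.map_congr_left
  intro k _
  rw [getD_foldl_keyed_add]
  simp
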